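-- pv_equiv track=rewrite | github.com/m104/aoc-2020 | day04.py | group_input_to_passports
-- ===== SOURCE A (Python) =====
-- def group_input_to_passports(lines):
--     groups = []
--     group = []
--     for line in lines:
--         if line:
--             group.append(line)
--         else:
--             groups.append(group)
--             group = []
--
--     groups.append(group)
--     return groups
-- ===== SOURCE B (Python) =====
-- def group_input_to_passports(lines):
--     seps = [i for i, line in enumerate(lines) if not line]
--     bounds = [-1] + seps + [len(lines)]
--     return [lines[a + 1:b] for a, b in zip(bounds, bounds[1:])]
-- ===== Notes on version B (the rewrite author's own statement) =====
-- stated objective: alternative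
-- what changed: Replaces A's stateful accumulator loop with an index-based pass: collect the positions of blank lines, form boundary list [-1]+seps+[len], and emit one slice per adjacent boundary pair.
import Mathlib
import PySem

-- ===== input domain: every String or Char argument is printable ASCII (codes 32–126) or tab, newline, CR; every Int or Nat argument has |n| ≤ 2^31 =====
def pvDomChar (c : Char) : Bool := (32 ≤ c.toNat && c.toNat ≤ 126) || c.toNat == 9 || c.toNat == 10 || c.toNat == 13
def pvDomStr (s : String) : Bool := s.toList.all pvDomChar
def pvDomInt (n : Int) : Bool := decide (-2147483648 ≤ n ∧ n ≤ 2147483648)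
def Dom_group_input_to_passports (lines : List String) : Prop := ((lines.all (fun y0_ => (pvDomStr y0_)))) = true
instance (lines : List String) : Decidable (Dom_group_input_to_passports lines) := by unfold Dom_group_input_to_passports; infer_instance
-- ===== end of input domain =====

-- B replaces A's stateful accumulator loop with blank-line boundary indices and one slice per adjacent boundary pair (alternative decomposition, same cost).

-- ===== PORT A =====
def group_input_to_passports (lines : List String) : List (List String) :=
  let st := lines.foldl
    (fun (st : List (List String) × List String) line =>
      if line ≠ "" then (st.1, st.2 ++ [line]) else (st.1 ++ [st.2], ([] : List String)))
    ([], [])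
  st.1 ++ [st.2]

-- ===== PORT B =====
def group_input_to_passports_alt (lines : List String) : List (List String) :=
  let seps : List Int := (PySem.List.enumerate lines 0).filterMap
    (fun p => if p.2 = "" then some p.1 else none)
  let bounds : List Int := -1 :: (seps ++ [(lines.length : Int)])
  (bounds.zip bounds.tail).map (fun p => PySem.List.slice lines (some (p.1 + 1)) (some p.2))

-- ===== PRECONDITION & SPEC =====
def Spec_group_input_to_passports (lines : List String) (out : List (List String)) : Prop := out = group_input_to_passports_alt lines
instance (lines : List String) (out : List (List String)) : Decidable (Spec_group_input_to_passports lines out) := by unfold Spec_group_input_to_passports; infer_instance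

-- ===== CLAIM (what is proved, stated in full; the proofs are below) =====
def Claim_equal_group_input_to_passports : Prop := ∀ (lines : List String), Dom_group_input_to_passports lines → Spec_group_input_to_passports lines (group_input_to_passports lines)

-- ===== LEMMAS AND PROOFS =====

/-- Reference splitter both ports are proved equal to. -/
def splitSep : List String → List (List String)
  | [] => [[]]
  | l :: ls =>
    if l = "" then [] :: splitSep ls
    else (l :: (splitSep ls).headI) :: (splitSep ls).tail

lemma splitSep_ne_nil (ls : List String) : splitSep ls ≠ [] := by
  cases ls with
  | nil => simp [splitSep]
  | cons l ls => by_cases h : l = "" <;> simp [splitSep, h]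

lemma cons_headI_tail' {α : Type} [Inhabited α] (l : List α) (h : l ≠ []) : l.headI :: l.tail = l := by
  cases l with
  | nil => exact absurd rfl h
  | cons a as => rfl

lemma foldl_A (ls : List String) (gs : List (List String)) (g : List String) :
    (ls.foldl
      (fun (st : List (List String) × List String) line =>
        if line ≠ "" then (st.1, st.2 ++ [line]) else (st.1 ++ [st.2], ([] : List String)))
      (gs, g)).1 ++ [(ls.foldl
      (fun (st : List (List String) × List String) line =>
        if line ≠ "" then (st.1, st.2 ++ [line]) else (st.1 ++ [st.2], ([] : List String)))
      (gs, g)).2]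
    = gs ++ (g ++ (splitSep ls).headI) :: (splitSep ls).tail := by
  induction ls generalizing gs g with
  | nil => simp [splitSep]
  | cons l ls ih =>
    rw [List.foldl_cons]
    by_cases h : l = ""
    · rw [if_neg (by simp [h]), ih, splitSep, if_pos h]
      simp [cons_headI_tail' _ (splitSep_ne_nil ls)]
    · rw [if_pos h, ih, splitSep, if_neg h]
      simp

lemma A_eq_splitSep (lines : List String) : group_input_to_passports lines = splitSep lines := by
  have h := foldl_A lines [] []
  simp only [List.nil_append] at h
  rw [cons_headI_tail' _ (splitSep_ne_nil lines)] at h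
  exact h

-- B side ---------------------------------------------------------------

lemma enumerate_shift {α : Type} (xs : List α) (s : Int) :
    PySem.List.enumerate xs (s + 1) = (PySem.List.enumerate xs s).map (fun p => (p.1 + 1, p.2)) := by
  induction xs generalizing s with
  | nil => simp [PySem.List.enumerate_nil]
  | cons x xs ih =>
    rw [PySem.List.enumerate_cons, PySem.List.enumerate_cons, List.map_cons, ← ih]

def sepsOf (lines : List String) : List Int :=
  (PySem.List.enumerate lines 0).filterMap (fun p => if p.2 = "" then some p.1 else none)

lemma sepsOf_cons (l : String) (ls : List String) :
    sepsOf (l :: ls)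
      = (if l = "" then [(0 : Int)] else []) ++ (sepsOf ls).map (· + 1) := by
  unfold sepsOf
  rw [PySem.List.enumerate_cons, List.filterMap_cons]
  have h1 : PySem.List.enumerate ls (0 + 1) = (PySem.List.enumerate ls 0).map (fun p => (p.1 + 1, p.2)) :=
    enumerate_shift ls 0
  rw [h1, List.filterMap_map]
  have hkey : List.filterMap ((fun p : Int × String => if p.2 = "" then some p.1 else none) ∘
        (fun p : Int × String => (p.1 + 1, p.2))) (PySem.List.enumerate ls 0)
      = ((PySem.List.enumerate ls 0).filterMap (fun p => if p.2 = "" then some p.1 else none)).map (· + 1) := by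
    rw [List.map_filterMap]
    apply List.filterMap_congr
    intro p _
    by_cases hp : p.2 = "" <;> simp [hp, Function.comp]
  rw [hkey]
  by_cases h : l = "" <;> simp [h]

lemma mem_sepsOf_nonneg {lines : List String} {i : Int} (h : i ∈ sepsOf lines) : 0 ≤ i := by
  unfold sepsOf at h
  obtain ⟨p, hp, hpi⟩ := List.mem_filterMap.mp h
  obtain ⟨k, hk, rfl⟩ := (PySem.List.mem_enumerate_iff _ _ _).mp hp
  by_cases hb : lines[k] = ""
  · simp [hb] at hpi; omega
  · simp [hb] at hpi

lemma slice_cons_shift {α : Type} (x : α) (xs : List α) (a b : Int) (ha : 0 ≤ a) (hb : 0 ≤ b) :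
    PySem.List.slice (x :: xs) (some (a + 1)) (some (b + 1)) = PySem.List.slice xs (some a) (some b) := by
  rw [PySem.List.slice_toNat _ (by omega) (by omega), PySem.List.slice_toNat _ ha hb]
  have h1 : (a + 1).toNat = a.toNat + 1 := by omega
  have h2 : (b + 1).toNat = b.toNat + 1 := by omega
  rw [h1, h2]
  simp [Nat.add_sub_add_right]

lemma slice_cons_head {α : Type} (x : α) (xs : List α) (b : Int) (hb : 0 ≤ b) :
    PySem.List.slice (x :: xs) (some (0 : Int)) (some (b + 1))
      = x :: PySem.List.slice xs (some (0 : Int)) (some b) := by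
  rw [PySem.List.slice_toNat _ (by omega) (by omega), PySem.List.slice_toNat _ le_rfl hb]
  have h2 : (b + 1).toNat = b.toNat + 1 := by omega
  simp [h2]

/-- The slice-per-adjacent-boundary-pair core of B. -/
def chop (xs : List String) (bnds : List Int) : List (List String) :=
  (bnds.zip bnds.tail).map (fun p => PySem.List.slice xs (some (p.1 + 1)) (some p.2))

lemma alt_eq_chop (lines : List String) :
    group_input_to_passports_alt lines
      = chop lines (-1 :: (sepsOf lines ++ [(lines.length : Int)])) := rfl

lemma chop_cons_front (xs : List String) (c : Int) (cs : List Int) :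
    chop xs (-1 :: c :: cs)
      = PySem.List.slice xs (some (0 : Int)) (some c) :: chop xs (c :: cs) := by
  unfold chop
  simp only [List.tail_cons, List.zip_cons_cons, List.map_cons]
  norm_num

lemma chop_shift (l : String) (ls : List String) (u : List Int)
    (h1 : ∀ i ∈ u, -1 ≤ i) (h2 : ∀ i ∈ u.tail, 0 ≤ i) :
    chop (l :: ls) (u.map (· + 1)) = chop ls u := by
  unfold chop
  have htail : (u.map (· + 1)).tail = u.tail.map (· + 1) := by cases u <;> simp
  rw [htail, show u.tail = u.tail.map id from by simp, List.map_map, List.zip_map]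
  simp only [List.map_map, List.map_id]
  apply List.map_congr_left
  intro p hp
  obtain ⟨hp1, hp2⟩ := List.of_mem_zip hp
  have ha : -1 ≤ p.1 := h1 _ hp1
  have hb : 0 ≤ p.2 := h2 _ hp2
  simp only [Prod.map, Function.comp, id]
  exact slice_cons_shift l ls (p.1 + 1) p.2 (by omega) hb

lemma mem_bounds_nonneg {ls : List String} {i : Int}
    (h : i ∈ sepsOf ls ++ [(ls.length : Int)]) : 0 ≤ i := by
  rcases List.mem_append.mp h with h | h
  · exact mem_sepsOf_nonneg h
  · simp at h; omega

/-- B's slices over adjacent boundaries compute `splitSep`. -/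
lemma B_eq_splitSep (lines : List String) :
    group_input_to_passports_alt lines = splitSep lines := by
  induction lines with
  | nil => decide
  | cons l ls ih =>
    rw [alt_eq_chop, sepsOf_cons]
    have hlen : (((l :: ls).length : Nat) : Int) = (ls.length : Int) + 1 := by
      simp
    by_cases h : l = ""
    · -- blank first line
      have hb : (if l = "" then [(0 : Int)] else []) ++ (sepsOf ls).map (· + 1)
            ++ [(((l :: ls).length : Nat) : Int)]
          = ((-1 : Int) :: (sepsOf ls ++ [(ls.length : Int)])).map (· + 1) := by
        rw [if_pos h, hlen]
        simp
      rw [hb, show ((-1 : Int) :: (sepsOf ls ++ [(ls.length : Int)])).map (· + 1)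
            = (0 : Int) :: (sepsOf ls ++ [(ls.length : Int)]).map (· + 1) from by simp,
          chop_cons_front]
      rw [show (0 : Int) :: (sepsOf ls ++ [(ls.length : Int)]).map (· + 1)
            = ((-1 : Int) :: (sepsOf ls ++ [(ls.length : Int)])).map (· + 1) from by simp,
          chop_shift l ls _ (by
            intro i hi
            rcases List.mem_cons.mp hi with rfl | hi
            · omega
            · have := mem_bounds_nonneg hi; omega) (by
            intro i hi
            exact mem_bounds_nonneg hi)]
      rw [← alt_eq_chop, ih, splitSep, if_pos h]
      have h0 : PySem.List.slice (l :: ls) (some (0 : Int)) (some (0 : Int)) = [] := by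
        rw [PySem.List.slice_toNat _ le_rfl le_rfl]; simp
      rw [h0]
    · -- nonblank first line
      obtain ⟨c, cs, hc⟩ : ∃ c cs, sepsOf ls ++ [(ls.length : Int)] = c :: cs := by
        cases hs : sepsOf ls with
        | nil => exact ⟨(ls.length : Int), [], by simp⟩
        | cons a as => exact ⟨a, as ++ [(ls.length : Int)], by simp⟩
      have hc0 : 0 ≤ c := mem_bounds_nonneg (by rw [hc]; simp)
      have hcs : ∀ i ∈ cs, 0 ≤ i := fun i hi =>
        mem_bounds_nonneg (by rw [hc]; exact List.mem_cons_of_mem _ hi)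
      have hb : (if l = "" then [(0 : Int)] else []) ++ (sepsOf ls).map (· + 1)
            ++ [(((l :: ls).length : Nat) : Int)]
          = (c + 1) :: cs.map (· + 1) := by
        rw [if_neg h, hlen]
        have : ((sepsOf ls).map (· + 1)) ++ [(ls.length : Int) + 1]
            = (sepsOf ls ++ [(ls.length : Int)]).map (· + 1) := by simp
        simp only [List.nil_append]
        rw [this, hc]
        simp
      rw [hb, chop_cons_front,
          show ((c + 1) :: cs.map (· + 1) : List Int) = (c :: cs).map (· + 1) from rfl,
          chop_shift l ls _ (by
            intro i hi
            have := mem_bounds_nonneg (by rw [hc]; exact hi); omega) (by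
            intro i hi
            exact hcs _ (by simpa using hi))]
      have hihc : PySem.List.slice ls (some (0 : Int)) (some c) :: chop ls (c :: cs)
          = splitSep ls := by
        rw [← chop_cons_front, ← hc, ← alt_eq_chop, ih]
      have hhead : (splitSep ls).headI = PySem.List.slice ls (some (0 : Int)) (some c) := by
        rw [← hihc]; rfl
      have htl : (splitSep ls).tail = chop ls (c :: cs) := by
        rw [← hihc]; rfl
      rw [splitSep, if_neg h, hhead, htl, slice_cons_head l ls c hc0]

-- ===== VERDICT (by name: the statement is the Claim_ definition above) =====
theorem group_input_to_passports_spec : Claim_equal_group_input_to_passports := by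
  intro lines _
  unfold Spec_group_input_to_passports
  rw [A_eq_splitSep, B_eq_splitSep]
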